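-- pv_equiv track=rewrite | github.com/darmawanalbert/assignment1 | assignment1.py | calculate_total_unique_kmers
-- ===== SOURCE A (Python) =====
-- def calculate_total_unique_kmers(kmers1, kmers2):
--     unique_kmers = 0
--     for k in kmers1:
--         if k not in kmers2:
--             unique_kmers += 1
--
--     for k in kmers2:
--         if k not in kmers1:
--             unique_kmers += 1
--
--     return unique_kmers
-- ===== SOURCE B (Python) =====
-- def calculate_total_unique_kmers(kmers1, kmers2):
--     c1 = {}
--     for k in kmers1:
--         c1[k] = c1.get(k, 0) + 1
--     c2 = {}
--     for k in kmers2: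
--         c2[k] = c2.get(k, 0) + 1
--     shared = c1.keys() & c2.keys()
--     return len(kmers1) + len(kmers2) - sum(c1[k] + c2[k] for k in shared)
-- ===== Notes on version B (the rewrite author's own statement) =====
-- stated objective: faster
-- what changed: Complement counting: instead of testing every element for absence in the other list, B computes len(kmers1)+len(kmers2) and subtracts the total multiplicity of the shared keys (intersection of the two frequency dicts' key sets), correct by inclusion-exclusion since every element is either shared or unique.
import Mathlib
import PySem

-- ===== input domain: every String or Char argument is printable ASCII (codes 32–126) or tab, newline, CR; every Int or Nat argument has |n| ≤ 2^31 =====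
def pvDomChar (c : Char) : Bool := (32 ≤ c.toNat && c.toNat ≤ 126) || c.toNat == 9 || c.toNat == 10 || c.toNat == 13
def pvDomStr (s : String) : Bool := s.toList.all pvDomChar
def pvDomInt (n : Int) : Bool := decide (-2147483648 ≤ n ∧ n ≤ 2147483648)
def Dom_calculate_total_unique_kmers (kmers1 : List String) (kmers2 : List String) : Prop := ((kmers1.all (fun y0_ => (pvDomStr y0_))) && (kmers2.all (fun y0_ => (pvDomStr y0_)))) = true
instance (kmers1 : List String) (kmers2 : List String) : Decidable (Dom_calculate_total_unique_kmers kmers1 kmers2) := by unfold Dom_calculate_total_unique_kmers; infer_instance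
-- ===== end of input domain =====

-- B replaces A's quadratic absence-scans by complement counting: len(kmers1)+len(kmers2) minus the
-- multiplicities of the shared keys of two frequency dicts (measured faster on large inputs).


-- ===== PORT A =====
def calculate_total_unique_kmers (kmers1 : List String) (kmers2 : List String) : Int :=
  let unique_kmers : Int := 0
  let unique_kmers := kmers1.foldl
    (fun acc k => if !(kmers2.contains k) then acc + 1 else acc) unique_kmers
  let unique_kmers := kmers2.foldl
    (fun acc k => if !(kmers1.contains k) then acc + 1 else acc) unique_kmers
  unique_kmers

-- ===== PORT B =====
-- Python's `c1.keys() & c2.keys()` is an unordered set; the returned value is a commutative sum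
-- over it, so enumerating it as the keys of c1 that are also keys of c2 is exact.
def calculate_total_unique_kmers_alt (kmers1 : List String) (kmers2 : List String) : Int :=
  let c1 : PySem.Dict String Int :=
    kmers1.foldl (fun d k => d.insert k (d.getD k 0 + 1)) PySem.Dict.empty
  let c2 : PySem.Dict String Int :=
    kmers2.foldl (fun d k => d.insert k (d.getD k 0 + 1)) PySem.Dict.empty
  let shared := c1.keys.filter (fun k => c2.contains k)
  (kmers1.length : Int) + (kmers2.length : Int)
    - (shared.map (fun k => c1.getD k 0 + c2.getD k 0)).sum

-- ===== PRECONDITION & SPEC =====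
def Spec_calculate_total_unique_kmers (kmers1 : List String) (kmers2 : List String) (out : Int) : Prop := out = calculate_total_unique_kmers_alt kmers1 kmers2
instance (kmers1 : List String) (kmers2 : List String) (out : Int) : Decidable (Spec_calculate_total_unique_kmers kmers1 kmers2 out) := by unfold Spec_calculate_total_unique_kmers; infer_instance

-- ===== CLAIM (what is proved, stated in full; the proofs are below) =====
def Claim_equal_calculate_total_unique_kmers : Prop := ∀ (kmers1 : List String) (kmers2 : List String), Dom_calculate_total_unique_kmers kmers1 kmers2 → Spec_calculate_total_unique_kmers kmers1 kmers2 (calculate_total_unique_kmers kmers1 kmers2)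

-- ===== LEMMAS AND PROOFS =====

-- Summing the multiplicities (in xs) of the keys of a duplicate-free list l that satisfy p
-- equals counting the elements of xs that lie in l and satisfy p.
lemma sum_counts_filter (l : List String) (p : String → Bool) (xs : List String)
    (hn : l.Nodup) :
    ((l.filter p).map (fun k => (xs.count k : Int))).sum
      = (xs.countP (fun x => l.contains x && p x) : Int) := by
  induction xs with
  | nil => simp
  | cons x xs ih =>
    have hcount : ∀ k : String, ((x :: xs).count k : Int)
        = (xs.count k : Int) + (if k == x then 1 else 0) := by
      intro k
      by_cases hk : k = x
      · subst hk; simp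
      · simp [hk, Ne.symm hk]
    calc ((l.filter p).map (fun k => ((x :: xs).count k : Int))).sum
        = ((l.filter p).map (fun k => (xs.count k : Int) + (if k == x then 1 else 0))).sum := by
          simp only [hcount]
      _ = ((l.filter p).map (fun k => (xs.count k : Int))).sum
            + ((l.filter p).map (fun k => (if k == x then (1:Int) else 0))).sum := by
          rw [PySem.List.sum_map_add_int]
      _ = ((x :: xs).countP (fun x => l.contains x && p x) : Int) := by
        rw [ih]
        have hnf : (l.filter p).Nodup := hn.filter p
        have h1 : ((l.filter p).map (fun k => (if k == x then (1:Int) else 0))).sum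
            = ((l.filter p).count x : Int) := by
          rw [PySem.List.sum_map_ite_one_zero]; rfl
        have hc : (l.filter p).count x = if (l.contains x && p x) then 1 else 0 := by
          by_cases hq : (l.contains x && p x) = true
          · obtain ⟨ha, hb⟩ := Bool.and_eq_true_iff.mp hq
            have hmem : x ∈ l.filter p :=
              List.mem_filter.mpr ⟨List.mem_of_elem_eq_true ha, hb⟩
            rw [List.count_eq_one_of_mem hnf hmem, if_pos hq]
          · have hmem : x ∉ l.filter p := by
              intro h
              exact hq (Bool.and_eq_true_iff.mpr
                ⟨List.elem_eq_true_of_mem (List.mem_filter.mp h).1,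
                 (List.mem_filter.mp h).2⟩)
            rw [List.count_eq_zero.mpr hmem, if_neg hq]
        rw [h1, hc, List.countP_cons]
        push_cast
        by_cases hq : (l.contains x && p x) = true
        · rw [if_pos hq]
        · rw [if_neg hq]

-- The shared-multiplicity sum in B, specialised via the counter lemmas:
-- it equals (elements of kmers1 present in kmers2) + (elements of kmers2 present in kmers1).
lemma shared_sum (kmers1 kmers2 : List String) :
    ((((PySem.Dict.counter kmers1 : PySem.Dict String Int).keys.filter
          (fun k => (PySem.Dict.counter kmers2 : PySem.Dict String Int).contains k)).map
        (fun k => (PySem.Dict.counter kmers1 : PySem.Dict String Int).getD k 0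
                  + (PySem.Dict.counter kmers2 : PySem.Dict String Int).getD k 0)).sum)
    = (kmers1.countP (fun k => kmers2.contains k) : Int)
      + (kmers2.countP (fun k => kmers1.contains k) : Int) := by
  have hkeys : (PySem.Dict.counter kmers1 : PySem.Dict String Int).keys
      = PySem.Set.ofList kmers1 := PySem.Dict.keys_counter ..
  have hc2 : ∀ k : String,
      (PySem.Dict.counter kmers2 : PySem.Dict String Int).contains k = kmers2.contains k :=
    fun k => PySem.Dict.contains_counter ..
  have hget : ∀ (xs : List String) (k : String),
      (PySem.Dict.counter xs : PySem.Dict String Int).getD k 0 = (xs.count k : Int) :=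
    fun xs k => PySem.Dict.getD_counter ..
  have hmap : ∀ k : String,
      (PySem.Dict.counter kmers1 : PySem.Dict String Int).getD k 0
        + (PySem.Dict.counter kmers2 : PySem.Dict String Int).getD k 0
      = (kmers1.count k : Int) + (kmers2.count k : Int) := by
    intro k; rw [hget, hget]
  simp only [hkeys, hc2, hmap]
  have hsplit : ((((PySem.Set.ofList kmers1).filter (fun k => kmers2.contains k)).map
        (fun k => (kmers1.count k : Int) + (kmers2.count k : Int))).sum)
      = (((PySem.Set.ofList kmers1).filter (fun k => kmers2.contains k)).map
          (fun k => (kmers1.count k : Int))).sum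
        + (((PySem.Set.ofList kmers1).filter (fun k => kmers2.contains k)).map
          (fun k => (kmers2.count k : Int))).sum := PySem.List.sum_map_add_int ..
  rw [hsplit,
      sum_counts_filter _ _ _ (PySem.Set.nodup_ofList kmers1),
      sum_counts_filter _ _ _ (PySem.Set.nodup_ofList kmers1)]
  congr 1
  · congr 1
    apply List.countP_congr
    intro x hx
    simp [PySem.Set.mem_ofList, hx]
  · congr 1
    apply List.countP_congr
    intro x hx
    simp [PySem.Set.mem_ofList, hx]

-- length splits into the matching and non-matching counts
lemma length_split (xs : List String) (p : String → Bool) :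
    (xs.length : Int) = (xs.countP p : Int) + (xs.countP (fun x => !(p x)) : Int) := by
  induction xs with
  | nil => simp
  | cons x xs ih =>
    simp only [List.length_cons, List.countP_cons]
    push_cast
    push_cast at ih
    cases hp : p x
    · rw [if_neg (by simp), if_pos (by simp)]; omega
    · rw [if_pos (by simp), if_neg (by simp)]; omega

-- ===== VERDICT (by name: the statement is the Claim_ definition above) =====
theorem calculate_total_unique_kmers_spec : Claim_equal_calculate_total_unique_kmers := by
  intro kmers1 kmers2 _
  unfold Spec_calculate_total_unique_kmers calculate_total_unique_kmers calculate_total_unique_kmers_alt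
  simp only [PySem.Dict.foldl_insert_getD_add_one_eq_counter]
  rw [shared_sum,
      PySem.List.foldl_if_add_one, PySem.List.foldl_if_add_one,
      length_split kmers1 (fun k => kmers2.contains k),
      length_split kmers2 (fun k => kmers1.contains k)]
  ring
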